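-- pv_equiv track=rewrite | github.com/shinas07/career-path-recommendation | backend/careerpath/views.py | parse_grades
-- ===== SOURCE A (Python) =====
-- def parse_grades(text_content):
--     """Parse grades from converted text to structured format."""
--     grades = []
--     current_record = {}
--
--     for line in text_content.split('\n'):
--         if line.startswith('Record'):
--             if current_record:
--                 grades.append(current_record)
--                 current_record = {}
--         elif ':' in line:
--             key, value = line.split(':', 1)
--             current_record[key.strip()] = value.strip()
--
--     if current_record:
--         grades.append(current_record)
--
--     return grades
-- ===== SOURCE B (Python) =====
-- def parse_grades(text_content):
--     """Parse grades from converted text to structured format."""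
--     lines = text_content.split('\n')
--     groups = [[]]
--     for line in lines:
--         if line.startswith('Record'):
--             groups.append([])
--         else:
--             groups[-1].append(line)
--     records = ({key.strip(): value.strip()
--                 for key, value in (line.split(':', 1) for line in group if ':' in line)}
--                for group in groups)
--     return [record for record in records if record]
-- ===== Notes on version B (the rewrite author's own statement) =====
-- stated objective: alternative
-- what changed: Replaces A's single loop threading a mutable current_record through branch state with a two-phase pipeline: first partition the lines into groups at the separator lines, then build each record with a dict comprehension and filter out empty ones.
import Mathlib
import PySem

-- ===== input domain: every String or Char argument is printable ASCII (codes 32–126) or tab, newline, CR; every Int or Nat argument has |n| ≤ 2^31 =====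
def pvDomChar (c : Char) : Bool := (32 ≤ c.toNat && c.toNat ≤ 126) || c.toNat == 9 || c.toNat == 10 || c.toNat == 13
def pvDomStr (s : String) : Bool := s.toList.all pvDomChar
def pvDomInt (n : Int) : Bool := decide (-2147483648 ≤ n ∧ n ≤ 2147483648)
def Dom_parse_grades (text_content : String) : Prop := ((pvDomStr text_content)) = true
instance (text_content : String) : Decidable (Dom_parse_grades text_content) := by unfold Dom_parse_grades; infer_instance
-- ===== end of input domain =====

-- B re-decomposes A's stateful single loop as partition-lines-into-groups, build-dict-per-group, drop-empties (objective: alternative).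

-- ===== PORT A =====
-- one loop step of A: a separator line flushes current_record, key-value lines update it
def pvStepA (st : List (PySem.Dict String String) × PySem.Dict String String) (line : String) :
    List (PySem.Dict String String) × PySem.Dict String String :=
  if PySem.Str.startswith line "Record" then
    if st.2.items = [] then st else (st.1 ++ [st.2], PySem.Dict.empty)
  else if PySem.Str.isIn ":" line then
    match PySem.Str.splitMax? line ":" 1 with
    | some [key, value] => (st.1, st.2.insert (PySem.Str.strip key) (PySem.Str.strip value))
    | _ => st  -- unreachable: split(':', 1) with ':' present yields exactly two parts
  else st

-- the trailing "if current_record: grades.append(current_record)"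
def pvOutA (st : List (PySem.Dict String String) × PySem.Dict String String) :
    List (PySem.Dict String String) :=
  if st.2.items = [] then st.1 else st.1 ++ [st.2]

def parse_grades (text_content : String) : List (List (String × String)) :=
  let lines := (PySem.Str.split? text_content "\n").getD []
  let st := lines.foldl pvStepA ([], PySem.Dict.empty)
  (pvOutA st).map (·.items)

-- ===== PORT B =====
-- B's grouping loop: a separator line starts a new group, any other line joins the last group
def pvStepB (gs : List (List String)) (line : String) : List (List String) :=
  if PySem.Str.startswith line "Record" then gs ++ [[]]
  else gs.dropLast ++ [(gs.getLast?.getD []) ++ [line]]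

-- B's dict comprehension over the key-value lines of one group
def pvProcB (d : PySem.Dict String String) (line : String) : PySem.Dict String String :=
  if PySem.Str.isIn ":" line then
    match PySem.Str.splitMax? line ":" 1 with
    | some [key, value] => d.insert (PySem.Str.strip key) (PySem.Str.strip value)
    | _ => d  -- unreachable: split(':', 1) with ':' present yields exactly two parts
  else d

def pvRecOf (group : List String) : PySem.Dict String String :=
  group.foldl pvProcB PySem.Dict.empty

def parse_grades_alt (text_content : String) : List (List (String × String)) :=
  let lines := (PySem.Str.split? text_content "\n").getD []
  let groups := lines.foldl pvStepB [[]]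
  (((groups.map pvRecOf).filter (fun r => !r.items.isEmpty)).map (·.items))

-- ===== PRECONDITION & SPEC =====
def Spec_parse_grades (text_content : String) (out : List (List (String × String))) : Prop := out = parse_grades_alt text_content
instance (text_content : String) (out : List (List (String × String))) : Decidable (Spec_parse_grades text_content out) := by unfold Spec_parse_grades; infer_instance

-- ===== CLAIM (what is proved, stated in full; the proofs are below) =====
def Claim_equal_parse_grades : Prop := ∀ (text_content : String), Dom_parse_grades text_content → Spec_parse_grades text_content (parse_grades text_content)

-- ===== LEMMAS AND PROOFS =====

-- B's grouping loop only touches the last group: a finished prefix passes through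
theorem pv_foldB_shift (lines : List String) (gs : List (List String)) (cur : List String) :
    List.foldl pvStepB (gs ++ [cur]) lines = gs ++ List.foldl pvStepB [cur] lines := by
  induction lines generalizing gs cur with
  | nil => rfl
  | cons l t ih =>
      simp only [List.foldl_cons, pvStepB]
      by_cases h : PySem.Str.startswith l "Record"
      · simp only [h, if_pos]
        rw [ih (gs ++ [cur]) [], ih [cur] []]
        simp [List.append_assoc]
      · simp only [h, Bool.false_eq_true, if_false, List.dropLast_concat,
          List.getLast?_concat, Option.getD_some, List.dropLast_singleton,
          List.getLast?_singleton, List.nil_append]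
        exact ih gs (cur ++ [l])

-- a dict with empty item list is the empty dict
theorem pv_dict_eq_empty (d : PySem.Dict String String) (h : d.items = []) :
    d = PySem.Dict.empty := by
  cases d with
  | mk items => subst h; rfl

-- A's non-'Record' step is B's per-group dict step
theorem pv_stepA_of_not_record (g : List (PySem.Dict String String))
    (d : PySem.Dict String String) (l : String)
    (h : ¬ PySem.Str.startswith l "Record") :
    pvStepA (g, d) l = (g, pvProcB d l) := by
  simp only [pvStepA, pvProcB, h, Bool.false_eq_true, if_false]
  by_cases h2 : PySem.Str.isIn ":" l = true
  · simp only [h2, if_true]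
    split <;> rfl
  · simp only [h2, Bool.false_eq_true, if_false]

-- main invariant: A's loop from (g, record-of-cur) computes g ++ B's records of the groups from [cur]
theorem pv_main (lines : List String) (g : List (PySem.Dict String String)) (cur : List String) :
    pvOutA (List.foldl pvStepA (g, pvRecOf cur) lines)
      = g ++ ((List.foldl pvStepB [cur] lines).map pvRecOf).filter (fun r => !r.items.isEmpty) := by
  induction lines generalizing g cur with
  | nil =>
      by_cases h : (pvRecOf cur).items = [] <;>
        simp [pvOutA, h]
  | cons l t ih =>
      simp only [List.foldl_cons]
      by_cases h : PySem.Str.startswith l "Record"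
      · have hb : pvStepB [cur] l = [cur, []] := by
          unfold pvStepB; rw [if_pos h]; rfl
        have e2 : List.foldl pvStepB [cur, []] t = [cur] ++ List.foldl pvStepB [[]] t :=
          pv_foldB_shift t [cur] []
        by_cases h0 : (pvRecOf cur).items = []
        · have e1 : pvStepA (g, pvRecOf cur) l = (g, pvRecOf cur) := by
            unfold pvStepA; rw [if_pos h, if_pos h0]
          have hd : pvRecOf cur = pvRecOf [] := by
            rw [pv_dict_eq_empty _ h0]; rfl
          rw [e1, hd, ih g [], hb, e2]
          simp [h0]
        · have e1 : pvStepA (g, pvRecOf cur) l = (g ++ [pvRecOf cur], pvRecOf []) := by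
            unfold pvStepA; rw [if_pos h, if_neg h0]; rfl
          rw [e1, ih (g ++ [pvRecOf cur]) [], hb, e2]
          simp [h0, List.append_assoc]
      · have hb : pvStepB [cur] l = [cur ++ [l]] := by
          unfold pvStepB; rw [if_neg h]; simp
        have e1 : pvStepA (g, pvRecOf cur) l = (g, pvRecOf (cur ++ [l])) := by
          rw [pv_stepA_of_not_record _ _ _ h, pvRecOf, pvRecOf, List.foldl_concat]
        rw [e1, hb, ih]

-- ===== VERDICT (by name: the statement is the Claim_ definition above) =====
theorem parse_grades_spec : Claim_equal_parse_grades := by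
  intro t _
  show parse_grades t = parse_grades_alt t
  unfold parse_grades parse_grades_alt
  dsimp only
  have h := pv_main ((PySem.Str.split? t "\n").getD []) [] []
  rw [List.nil_append] at h
  rw [show (PySem.Dict.empty : PySem.Dict String String) = pvRecOf [] from rfl, h]
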